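-- pv_equiv track=rewrite | github.com/rahulkmr/python3_musings | total_grid_paths2.py | is_prev
-- ===== SOURCE A (Python) =====
-- def is_prev(neighbour, node, prev):
--     parents = prev.get(node)
--     if not parents:
--         return False
--     elif neighbour == node or neighbour in parents:
--         return True
--     else:
--         return any(is_prev(neighbour, p, prev) for p in parents)
-- ===== SOURCE B (Python) =====
-- def is_prev(neighbour, node, prev):
--     # Iterative traversal over the parent graph with a visited set: each node
--     # is explored at most once, with no recursion.
--     seen = {node}
--     stack = [node]
--     while stack:
--         x = stack.pop()
--         parents = prev.get(x) or []
--         if parents and (neighbour == x or neighbour in parents):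
--             return True
--         for p in parents:
--             if p not in seen:
--                 seen.add(p)
--                 stack.append(p)
--     return False
-- ===== Notes on version B (the rewrite author's own statement) =====
-- stated objective: alternative
-- what changed: A's naive recursion over the parent map is replaced by an iterative worklist traversal with a visited set, which explores each node at most once instead of re-exploring shared ancestors.
-- outside the precondition, e.g. on is_prev(4, 1, {1: [3, 2], 2: [2], 3: [4]}): A returns True, B returns True
import Mathlib
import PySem

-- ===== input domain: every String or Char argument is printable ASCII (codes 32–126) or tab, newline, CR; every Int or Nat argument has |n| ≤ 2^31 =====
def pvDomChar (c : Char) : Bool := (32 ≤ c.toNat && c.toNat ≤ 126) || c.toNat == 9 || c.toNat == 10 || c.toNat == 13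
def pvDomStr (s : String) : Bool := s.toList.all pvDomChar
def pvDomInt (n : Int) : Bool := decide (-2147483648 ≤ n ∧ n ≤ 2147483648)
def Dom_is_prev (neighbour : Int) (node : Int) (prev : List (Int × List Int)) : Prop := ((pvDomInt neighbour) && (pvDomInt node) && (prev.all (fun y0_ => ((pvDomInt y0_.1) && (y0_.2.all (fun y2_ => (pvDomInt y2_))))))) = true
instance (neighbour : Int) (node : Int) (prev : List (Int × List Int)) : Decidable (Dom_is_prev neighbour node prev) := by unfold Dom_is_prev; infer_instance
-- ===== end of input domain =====

-- B replaces A's naive recursion by an iterative worklist traversal with a visited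
-- set (each node explored at most once); objective: alternative.

-- ===== PORT A =====
-- A's recursion need not terminate on cyclic `prev` (Python dies with
-- RecursionError there; such inputs are outside Pre_); the fuel argument is a
-- pure totality guard: inside Pre_ every recursion chain visits pairwise
-- distinct keys of prev, so its length is ≤ prev.length + 1 and the fuel is
-- never exhausted there.
def is_prevFuel (prev : List (Int × List Int)) (neighbour : Int) : Nat → Int → Bool
  | 0, _ => false
  | fuel + 1, node =>
    match (PySem.Dict.mk prev).get? node with
    | none => false                                  -- `not parents` (None)
    | some parents =>
      if parents.isEmpty then false                  -- `not parents` (empty list)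
      else if neighbour == node || parents.contains neighbour then true
      else parents.any (fun p => is_prevFuel prev neighbour fuel p)

def is_prev (neighbour : Int) (node : Int) (prev : List (Int × List Int)) : Bool :=
  is_prevFuel prev neighbour (prev.length + 1) node

-- ===== PORT B =====
-- the while-loop of Source B; fuel is a pure totality guard: each iteration pops one
-- stack entry and every push is of a fresh `seen` element drawn from the parents
-- lists, so the loop runs at most (total size of parents lists) + 2 times.
def bfsFuel (prev : List (Int × List Int)) (neighbour : Int) :
    Nat → List Int → PySem.Set Int → Bool
  | _, [], _ => false                                -- while stack: exhausted
  | 0, _ :: _, _ => false                            -- fuel guard, never reached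
  | fuel + 1, x :: stack, seen =>
    let parents := ((PySem.Dict.mk prev).get? x).getD []   -- prev.get(x) or []
    if !parents.isEmpty && (neighbour == x || parents.contains neighbour) then true
    else
      let ss := parents.foldl
        (fun acc p =>
          if PySem.Set.contains acc.2 p then acc
          else (p :: acc.1, PySem.Set.add acc.2 p))
        (stack, seen)
      bfsFuel prev neighbour fuel ss.1 ss.2

def is_prev_alt (neighbour : Int) (node : Int) (prev : List (Int × List Int)) : Bool :=
  bfsFuel prev neighbour ((prev.map (fun kv => kv.2.length)).sum + 2)
    [node] (PySem.Set.ofList [node])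

-- ===== PRECONDITION & SPEC =====
-- helpers for Pre_: the parents of x; the vertices A actually recurses into from
-- x (none when the lookup misses, the parents list is empty, or the hit test at
-- x succeeds — A returns there without recursing); and iterated reachability
-- along those recursion edges.
def pvSuccs (prev : List (Int × List Int)) (x : Int) : List Int :=
  ((PySem.Dict.mk prev).get? x).getD []

def pvExpand (prev : List (Int × List Int)) (neighbour : Int) (x : Int) : List Int :=
  let ps := pvSuccs prev x
  if ps.isEmpty then [] else if neighbour == x || ps.contains neighbour then [] else ps

def pvStep (prev : List (Int × List Int)) (neighbour : Int)
    (acc : PySem.Set Int) : PySem.Set Int :=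
  PySem.Set.update acc (acc.flatMap (pvExpand prev neighbour))

def pvReach (prev : List (Int × List Int)) (neighbour : Int)
    (start : List Int) : PySem.Set Int :=
  (pvStep prev neighbour)^[prev.length + 1] (PySem.Set.ofList start)

-- Pre_ excludes exactly the inputs on which the recursion of Python A is doomed:
-- a cycle of non-hit vertices is reachable from `node` through non-hit vertices,
-- so A dies with RecursionError as soon as its left-to-right evaluation reaches
-- that cycle — on the few such inputs where an earlier branch happens to hit
-- first, A returns True and B returns True as well (see the cite in claim.json).
def Pre_is_prev (neighbour : Int) (node : Int) (prev : List (Int × List Int)) : Prop :=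
  ∀ x ∈ pvReach prev neighbour [node], x ∉ pvReach prev neighbour (pvExpand prev neighbour x)
instance (neighbour : Int) (node : Int) (prev : List (Int × List Int)) : Decidable (Pre_is_prev neighbour node prev) := by unfold Pre_is_prev; infer_instance

def pvWitness_is_prev : Int × Int × (List (Int × List Int)) := (2, 1, [(1, [2])])

def Spec_is_prev (neighbour : Int) (node : Int) (prev : List (Int × List Int)) (out : Bool) : Prop := out = is_prev_alt neighbour node prev
instance (neighbour : Int) (node : Int) (prev : List (Int × List Int)) (out : Bool) : Decidable (Spec_is_prev neighbour node prev out) := by unfold Spec_is_prev; infer_instance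

-- ===== CLAIM (what is proved, stated in full; the proofs are below) =====
def Claim_equal_is_prev : Prop := ∀ (neighbour : Int) (node : Int) (prev : List (Int × List Int)), Dom_is_prev neighbour node prev → Pre_is_prev neighbour node prev → Spec_is_prev neighbour node prev (is_prev neighbour node prev)

-- ===== LEMMAS AND PROOFS =====

-- a parent path x → … → y; the list records every vertex except the last
inductive PvPath (prev : List (Int × List Int)) : Int → List Int → Int → Prop
  | nil (x : Int) : PvPath prev x [] x
  | cons {x p y : Int} {l : List Int} (hp : p ∈ pvSuccs prev x)
      (h : PvPath prev p l y) : PvPath prev x (x :: l) y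

-- the hit test of both programs, as a proposition
def PvGood (neighbour : Int) (prev : List (Int × List Int)) (x : Int) : Prop :=
  pvSuccs prev x ≠ [] ∧ (neighbour = x ∨ neighbour ∈ pvSuccs prev x)

def PvHit (neighbour : Int) (prev : List (Int × List Int)) (node : Int) : Prop :=
  ∃ y, (∃ l, PvPath prev node l y) ∧ PvGood neighbour prev y

theorem pvPath_append {prev : List (Int × List Int)} {x m y : Int} {l₁ l₂ : List Int}
    (h₁ : PvPath prev x l₁ m) (h₂ : PvPath prev m l₂ y) :
    PvPath prev x (l₁ ++ l₂) y := by
  induction h₁ with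
  | nil => simpa using h₂
  | cons hp _ ih => exact PvPath.cons hp (ih h₂)

theorem pvPath_append_decomp {prev : List (Int × List Int)} {x y : Int}
    {l₁ l₂ : List Int} (h : PvPath prev x (l₁ ++ l₂) y) :
    ∃ m, PvPath prev x l₁ m ∧ PvPath prev m l₂ y := by
  induction l₁ generalizing x with
  | nil => exact ⟨x, PvPath.nil x, by simpa using h⟩
  | cons a t ih =>
    cases h with
    | cons hp h' =>
      obtain ⟨m, hm₁, hm₂⟩ := ih h'
      exact ⟨m, PvPath.cons hp hm₁, hm₂⟩

theorem pvPath_cons_head {prev : List (Int × List Int)} {x y a : Int} {l : List Int}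
    (h : PvPath prev x (a :: l) y) : a = x := by
  cases h; rfl

theorem pvNot_nodup_decomp {l : List Int} (h : ¬ l.Nodup) :
    ∃ (l₁ l₂ l₃ : List Int) (a : Int), l = l₁ ++ a :: l₂ ++ a :: l₃ := by
  induction l with
  | nil => simp at h
  | cons b t ih =>
    by_cases hb : b ∈ t
    · obtain ⟨s, u, rfl⟩ := List.append_of_mem hb
      exact ⟨[], s, u, b, by simp⟩
    · have : ¬ t.Nodup := by
        intro hn; exact h (List.nodup_cons.mpr ⟨hb, hn⟩)
      obtain ⟨l₁, l₂, l₃, a, rfl⟩ := ih this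
      exact ⟨b :: l₁, l₂, l₃, a, by simp⟩

theorem pvPath_shorten {prev : List (Int × List Int)} :
    ∀ (n : Nat) (x y : Int) (l : List Int), l.length ≤ n → PvPath prev x l y →
    ∃ l', l'.Nodup ∧ l'.length ≤ l.length ∧ PvPath prev x l' y := by
  intro n
  induction n with
  | zero =>
    intro x y l hl h
    exact ⟨l, by cases l with
      | nil => simp
      | cons a t => simp at hl, le_refl _, h⟩
  | succ n ih =>
    intro x y l hl h
    by_cases hnd : l.Nodup
    · exact ⟨l, hnd, le_refl _, h⟩
    · obtain ⟨l₁, l₂, l₃, a, rfl⟩ := pvNot_nodup_decomp hnd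
      have h' : PvPath prev x (l₁ ++ ((a :: l₂) ++ (a :: l₃))) y := by
        simpa [List.append_assoc] using h
      obtain ⟨m, hm₁, hrest⟩ := pvPath_append_decomp (l₁ := l₁) h'
      obtain ⟨m', hm₂, hm₃⟩ := pvPath_append_decomp (l₁ := a :: l₂) (l₂ := a :: l₃) hrest
      have ham : a = m := pvPath_cons_head hm₂
      have ham' : a = m' := pvPath_cons_head hm₃
      have hm₃' : PvPath prev m (a :: l₃) y := by
        have hmm : m = m' := by rw [← ham, ← ham']
        rw [hmm]; exact hm₃
      have hshort : PvPath prev x (l₁ ++ a :: l₃) y := pvPath_append hm₁ hm₃'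

      have hlen : (l₁ ++ a :: l₃).length ≤ n := by
        simp at hl ⊢; omega
      obtain ⟨l', h₁, h₂, h₃⟩ := ih x y (l₁ ++ a :: l₃) hlen hshort
      refine ⟨l', h₁, ?_, h₃⟩
      simp at h₂ ⊢; omega

theorem pvPath_mem_keys {prev : List (Int × List Int)} {x y : Int} {l : List Int}
    (h : PvPath prev x l y) : ∀ a ∈ l, a ∈ prev.map (fun kv => kv.1) := by
  induction h with
  | nil => simp
  | cons hp h ih =>
    intro a ha
    rcases List.mem_cons.mp ha with rfl | ha
    · -- a has a successor, so its lookup is some nonempty list: a is a key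
      unfold pvSuccs at hp
      cases hget : (PySem.Dict.mk prev).get? a with
      | none => rw [hget] at hp; simp at hp
      | some ps =>
        have hmem : (a, ps) ∈ prev := by
          simpa [PySem.Dict.items] using
            PySem.Dict.mem_items_of_get?_eq_some (d := PySem.Dict.mk prev) hget
        exact List.mem_map.mpr ⟨(a, ps), hmem, rfl⟩
    · exact ih a ha

theorem pvNodup_path_len {prev : List (Int × List Int)} {x y : Int} {l : List Int}
    (hnd : l.Nodup) (h : PvPath prev x l y) : l.length ≤ prev.length := by
  have hsub : l ⊆ prev.map (fun kv => kv.1) := fun a ha => pvPath_mem_keys h a ha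
  calc l.length = l.toFinset.card := (List.toFinset_card_of_nodup hnd).symm
    _ ≤ (prev.map (fun kv => kv.1)).toFinset.card := by
        apply Finset.card_le_card
        intro a ha
        simp only [List.mem_toFinset] at ha ⊢
        exact hsub ha
    _ ≤ (prev.map (fun kv => kv.1)).length := List.toFinset_card_le _
    _ = prev.length := List.length_map ..

-- ===== A-side characterisation =====

theorem pvA_sound {prev : List (Int × List Int)} {neighbour : Int} :
    ∀ (f : Nat) (x : Int), is_prevFuel prev neighbour f x = true →
    PvHit neighbour prev x := by
  intro f
  induction f with
  | zero => intro x h; simp [is_prevFuel] at h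
  | succ f ih =>
    intro x h
    cases hget : (PySem.Dict.mk prev).get? x with
    | none => simp [is_prevFuel, hget] at h
    | some parents =>
      simp only [is_prevFuel, hget] at h
      have hsx : pvSuccs prev x = parents := by simp [pvSuccs, hget]
      by_cases hemp : parents.isEmpty
      · rw [if_pos hemp] at h; simp at h
      · rw [if_neg hemp] at h
        by_cases hhit : (neighbour == x || parents.contains neighbour) = true
        · refine ⟨x, ⟨[], PvPath.nil x⟩, ?_, ?_⟩
          · rw [hsx]; simpa using hemp
          · rw [hsx]; simpa using hhit
        · rw [if_neg hhit] at h
          simp only [List.any_eq_true] at h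
          obtain ⟨p, hp, hrec⟩ := h
          obtain ⟨y, ⟨l, hpath⟩, hgood⟩ := ih p hrec
          exact ⟨y, ⟨x :: l, PvPath.cons (hsx ▸ hp) hpath⟩, hgood⟩

theorem pvA_complete {prev : List (Int × List Int)} {neighbour : Int} :
    ∀ {x y : Int} {l : List Int} (f : Nat), PvPath prev x l y →
    PvGood neighbour prev y → l.length < f →
    is_prevFuel prev neighbour f x = true := by
  intro x y l f hpath
  induction hpath generalizing f with
  | nil =>
    intro hgood hf
    obtain ⟨f, rfl⟩ : ∃ g, f = g + 1 := ⟨f - 1, by omega⟩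
    obtain ⟨hne, hor⟩ := hgood
    unfold pvSuccs at hne hor
    cases hget : (PySem.Dict.mk prev).get? _ with
    | none => rw [hget] at hne; simp at hne
    | some parents =>
      rw [hget] at hne hor
      simp only [Option.getD_some] at hne hor
      simp only [is_prevFuel, hget]
      rw [if_neg (by simpa using hne)]
      rw [if_pos (by rcases hor with h | h <;> simp [h])]
  | @cons a p y l hp _ ih =>
    intro hgood hf
    obtain ⟨f, rfl⟩ : ∃ g, f = g + 1 := ⟨f - 1, by omega⟩
    have hne : pvSuccs prev a ≠ [] := by
      intro hnil; rw [hnil] at hp; simp at hp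
    unfold pvSuccs at hne hp
    cases hget : (PySem.Dict.mk prev).get? a with
    | none => rw [hget] at hne; simp at hne
    | some parents =>
      rw [hget] at hne hp
      simp only [Option.getD_some] at hne hp
      simp only [is_prevFuel, hget]
      rw [if_neg (by simpa using hne)]
      by_cases hhit : (neighbour == a || parents.contains neighbour) = true
      · rw [if_pos hhit]
      · rw [if_neg hhit]
        simp only [List.any_eq_true]
        refine ⟨p, hp, ih f hgood (by simp at hf ⊢; omega)⟩

theorem pvA_iff {prev : List (Int × List Int)} {neighbour node : Int} :
    is_prev neighbour node prev = true ↔ PvHit neighbour prev node := by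
  constructor
  · exact pvA_sound _ node
  · rintro ⟨y, ⟨l, hpath⟩, hgood⟩
    obtain ⟨l', hnd, hle, hpath'⟩ := pvPath_shorten l.length node y l (le_refl _) hpath
    exact pvA_complete (prev.length + 1) hpath' hgood
      (Nat.lt_succ_of_le (pvNodup_path_len hnd hpath'))

-- ===== B-side characterisation =====

-- the inner for-loop: it prepends to the stack (in reverse push order) and
-- appends to `seen` exactly the fresh parents, in one list `ns`
theorem pvFold_decomp (parents : List Int) :
    ∀ (st : List Int) (seen : PySem.Set Int),
    ∃ ns : List Int,
      parents.foldl
        (fun acc p =>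
          if PySem.Set.contains acc.2 p then acc
          else (p :: acc.1, PySem.Set.add acc.2 p)) (st, seen)
        = (ns.reverse ++ st, seen ++ ns)
      ∧ ns.Nodup ∧ (∀ a ∈ ns, a ∈ parents ∧ a ∉ seen)
      ∧ (∀ p ∈ parents, p ∈ ns ∨ p ∈ seen) := by
  induction parents with
  | nil => intro st seen; exact ⟨[], by simp, by simp, by simp, by simp⟩
  | cons p rest ih =>
    intro st seen
    by_cases hp : p ∈ seen
    · obtain ⟨ns, heq, hnd, hmem, hcov⟩ := ih st seen
      refine ⟨ns, ?_, hnd, ?_, ?_⟩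
      · simp only [List.foldl_cons]
        rw [if_pos (by simpa [PySem.Set.contains_iff] using hp)]
        exact heq
      · exact fun a ha => ⟨List.mem_cons_of_mem _ (hmem a ha).1, (hmem a ha).2⟩
      · intro q hq
        rcases List.mem_cons.mp hq with rfl | hq
        · exact Or.inr hp
        · exact hcov q hq
    · obtain ⟨ns, heq, hnd, hmem, hcov⟩ := ih (p :: st) (PySem.Set.add seen p)
      rw [PySem.Set.add_of_not_mem hp] at heq hmem hcov
      refine ⟨p :: ns, ?_, ?_, ?_, ?_⟩
      · simp only [List.foldl_cons]
        rw [if_neg (by simpa [PySem.Set.contains_iff] using hp)]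
        rw [PySem.Set.add_of_not_mem hp, heq]
        simp
      · refine List.nodup_cons.mpr ⟨fun hmm => ?_, hnd⟩
        exact (hmem p hmm).2 (by simp)
      · intro a ha
        rcases List.mem_cons.mp ha with rfl | ha
        · exact ⟨List.mem_cons_self .., hp⟩
        · obtain ⟨h1, h2⟩ := hmem a ha
          exact ⟨List.mem_cons_of_mem _ h1, fun hc => h2 (by simp [hc])⟩
      · intro q hq
        rcases List.mem_cons.mp hq with rfl | hq
        · exact Or.inl (List.mem_cons_self ..)
        · rcases hcov q hq with h | h
          · exact Or.inl (List.mem_cons_of_mem _ h)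
          · rcases List.mem_append.mp h with h | h
            · exact Or.inr h
            · exact Or.inl (by simp at h; simp [h])

-- the hit test of the loop body equals PvGood
theorem pvGuard_iff {prev : List (Int × List Int)} {neighbour x : Int} :
    (!(((PySem.Dict.mk prev).get? x).getD []).isEmpty
      && (neighbour == x || (((PySem.Dict.mk prev).get? x).getD []).contains neighbour)) = true
    ↔ PvGood neighbour prev x := by
  unfold PvGood pvSuccs
  constructor
  · intro h
    simp only [Bool.and_eq_true, Bool.not_eq_true', Bool.or_eq_true, beq_iff_eq,
      List.contains_eq_mem, decide_eq_true_eq] at h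
    exact ⟨by simpa [List.isEmpty_iff] using h.1, h.2⟩
  · rintro ⟨h1, h2⟩
    simp only [Bool.and_eq_true, Bool.not_eq_true', Bool.or_eq_true, beq_iff_eq,
      List.contains_eq_mem, decide_eq_true_eq]
    exact ⟨by simpa [List.isEmpty_iff] using h1, h2⟩

theorem pvB_sound {prev : List (Int × List Int)} {neighbour node : Int} :
    ∀ (f : Nat) (st : List Int) (seen : PySem.Set Int),
    (∀ z ∈ st, ∃ l, PvPath prev node l z) →
    bfsFuel prev neighbour f st seen = true → PvHit neighbour prev node := by
  intro f
  induction f with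
  | zero =>
    intro st seen _ h
    cases st <;> simp [bfsFuel] at h
  | succ f ih =>
    intro st seen hst h
    cases st with
    | nil => simp [bfsFuel] at h
    | cons x rest =>
      simp only [bfsFuel] at h
      by_cases hguard :
        (!(((PySem.Dict.mk prev).get? x).getD []).isEmpty
          && (neighbour == x || (((PySem.Dict.mk prev).get? x).getD []).contains neighbour)) = true
      · exact ⟨x, hst x (by simp), pvGuard_iff.mp hguard⟩
      · rw [if_neg hguard] at h
        obtain ⟨ns, heq, _, hmem, _⟩ :=
          pvFold_decomp (((PySem.Dict.mk prev).get? x).getD []) rest seen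
        rw [heq] at h
        refine ih _ _ ?_ h
        intro z hz
        rcases List.mem_append.mp hz with hz | hz
        · obtain ⟨l, hl⟩ := hst x (by simp)
          refine ⟨l ++ [x], pvPath_append hl (PvPath.cons ?_ (PvPath.nil z))⟩
          exact (hmem z (by simpa using hz)).1
        · exact hst z (List.mem_cons_of_mem _ hz)

-- if the loop ends with `False`, nothing reachable from `seen` is a hit
theorem pvClosed_no_hit {prev : List (Int × List Int)} {neighbour : Int}
    {seen : PySem.Set Int}
    (hcl : ∀ x ∈ seen, ¬ PvGood neighbour prev x ∧ ∀ p ∈ pvSuccs prev x, p ∈ seen) :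
    ∀ {y z : Int} {l : List Int}, y ∈ seen → PvPath prev y l z →
    ¬ PvGood neighbour prev z := by
  intro y z l hy hpath
  induction hpath with
  | nil => exact (hcl _ hy).1
  | cons hp _ ih => exact ih ((hcl _ hy).2 _ hp)

theorem pvB_complete_aux {prev : List (Int × List Int)} {neighbour : Int}
    {U : List Int} (hU : ∀ x : Int, ∀ p ∈ pvSuccs prev x, p ∈ U) :
    ∀ (f : Nat) (st : List Int) (seen : PySem.Set Int),
    bfsFuel prev neighbour f st seen = false →
    (∀ z ∈ st, z ∈ seen) →
    (∀ x ∈ seen, x ∉ st → ¬ PvGood neighbour prev x ∧ ∀ p ∈ pvSuccs prev x, p ∈ seen) →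
    seen.Nodup → (∀ x ∈ seen, x ∈ U) →
    st.length + U.length ≤ f + seen.length →
    ∀ y ∈ seen, ∀ (l : List Int) (z : Int), PvPath prev y l z →
    ¬ PvGood neighbour prev z := by
  intro f
  induction f with
  | zero =>
    intro st seen _ _ hdone hnd hsub hcount
    cases st with
    | nil =>
      intro y hy l z hpath
      exact pvClosed_no_hit (fun x hx => hdone x hx (by simp)) hy hpath
    | cons x rest =>
      exfalso
      have : seen.length ≤ U.length := by
        calc seen.length = seen.toFinset.card := (List.toFinset_card_of_nodup hnd).symm
          _ ≤ U.toFinset.card := by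
              apply Finset.card_le_card
              intro a ha
              simp only [List.mem_toFinset] at ha ⊢
              exact hsub a ha
          _ ≤ U.length := List.toFinset_card_le _
      simp at hcount
      omega
  | succ f ih =>
    intro st seen hrun hstseen hdone hnd hsub hcount
    cases st with
    | nil =>
      intro y hy l z hpath
      exact pvClosed_no_hit (fun x hx => hdone x hx (by simp)) hy hpath
    | cons x rest =>
      simp only [bfsFuel] at hrun
      by_cases hguard :
        (!(((PySem.Dict.mk prev).get? x).getD []).isEmpty
          && (neighbour == x || (((PySem.Dict.mk prev).get? x).getD []).contains neighbour)) = true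
      · rw [if_pos hguard] at hrun; simp at hrun
      · rw [if_neg hguard] at hrun
        have hngood : ¬ PvGood neighbour prev x := fun hg => hguard (pvGuard_iff.mpr hg)
        obtain ⟨ns, heq, hnsnd, hmem, hcov⟩ :=
          pvFold_decomp (((PySem.Dict.mk prev).get? x).getD []) rest seen
        rw [heq] at hrun
        have hsxeq : pvSuccs prev x = ((PySem.Dict.mk prev).get? x).getD [] := rfl
        have hmain := ih (ns.reverse ++ rest) (seen ++ ns) hrun
          (by
            intro z hz
            rcases List.mem_append.mp hz with hz | hz
            · exact List.mem_append.mpr (Or.inr (by simpa using hz))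
            · exact List.mem_append.mpr (Or.inl (hstseen z (List.mem_cons_of_mem _ hz))))
          (by
            intro a ha hnotin
            rcases List.mem_append.mp ha with ha | ha
            · by_cases hax : a = x
              · subst hax
                refine ⟨hngood, ?_⟩
                intro p hp
                rw [hsxeq] at hp
                rcases hcov p hp with h | h
                · exact List.mem_append.mpr (Or.inr h)
                · exact List.mem_append.mpr (Or.inl h)
              · have hant : a ∉ x :: rest := by
                  intro hc
                  rcases List.mem_cons.mp hc with h | h
                  · exact hax h
                  · exact hnotin (List.mem_append.mpr (Or.inr h))
                obtain ⟨h1, h2⟩ := hdone a ha hant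
                exact ⟨h1, fun p hp => List.mem_append.mpr (Or.inl (h2 p hp))⟩
            · exfalso
              exact hnotin (List.mem_append.mpr (Or.inl (by simpa using ha))))
          (by
            refine List.Nodup.append hnd hnsnd ?_
            intro a ha hb
            exact (hmem a hb).2 ha)
          (by
            intro a ha
            rcases List.mem_append.mp ha with ha | ha
            · exact hsub a ha
            · exact hU x a (by rw [hsxeq]; exact (hmem a ha).1))
          (by simp at hcount ⊢; omega)
        intro y hy l z hpath
        exact hmain y (List.mem_append.mpr (Or.inl hy)) l z hpath

theorem pvB_iff {prev : List (Int × List Int)} {neighbour node : Int} :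
    is_prev_alt neighbour node prev = true ↔ PvHit neighbour prev node := by
  constructor
  · intro h
    exact pvB_sound _ [node] _
      (by intro z hz; simp at hz; exact ⟨[], by rw [hz]; exact PvPath.nil node⟩) h
  · rintro ⟨y, ⟨l, hpath⟩, hgood⟩
    by_contra hfalse
    rw [Bool.not_eq_true] at hfalse
    unfold is_prev_alt at hfalse
    have hU : ∀ x : Int, ∀ p ∈ pvSuccs prev x, p ∈ node :: prev.flatMap (fun kv => kv.2) := by
      intro x p hp
      unfold pvSuccs at hp
      cases hget : (PySem.Dict.mk prev).get? x with
      | none => rw [hget] at hp; simp at hp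
      | some ps =>
        rw [hget] at hp; simp only [Option.getD_some] at hp
        have hmem : (x, ps) ∈ prev := by
          simpa [PySem.Dict.items] using
            PySem.Dict.mem_items_of_get?_eq_some (d := PySem.Dict.mk prev) hget
        exact List.mem_cons_of_mem _ (List.mem_flatMap.mpr ⟨(x, ps), hmem, hp⟩)
    have := pvB_complete_aux hU _ [node] (PySem.Set.ofList [node]) hfalse
      (by simp [PySem.Set.ofList])
      (by intro a ha hn; exfalso; exact hn (by simpa [PySem.Set.ofList] using ha))
      (by simp [PySem.Set.ofList])
      (by intro a ha; simp [PySem.Set.ofList] at ha; simp [ha])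
      (by
        have hlen : (prev.flatMap (fun kv => kv.2)).length
            = (prev.map fun kv => kv.2.length).sum := by
          simp [List.length_flatMap]
        simp only [List.length_cons, hlen, PySem.Set.ofList]
        simp; omega)
      node (by simp [PySem.Set.ofList]) l y hpath
    exact this hgood

-- ===== VERDICT (by name: the statement is the Claim_ definition above) =====
theorem is_prev_spec : Claim_equal_is_prev := by
  intro neighbour node prev _ _
  unfold Spec_is_prev
  rw [Bool.eq_iff_iff, pvA_iff, pvB_iff]
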